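-- pv_equiv track=rewrite | github.com/nuatmochoi/coding-test | 1003.py | fino_dp
-- ===== SOURCE A (Python) =====
-- def fino_dp(num):
--     cache= [ 0 for i in range(num+1)]
--     cnt = [ 0 for i in range(num+1)]
--     cache[0]=0
--     cnt[0]=(1,0)
--     if num==0:
--         return cnt[num]
--     cache[1]=1
--     cnt[1]=(0,1)
--     for idx in range(2, num+1):
--         cnt[idx]=tuple(sum(ele) for ele in zip(cnt[idx-1],cnt[idx-2]))
--     return cnt[num]
-- ===== SOURCE B (Python) =====
-- def fino_dp(num):
--     # Fast-doubling Fibonacci: O(log n) arithmetic steps instead of the O(n) DP table.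
--     def fib_pair(n):  # returns (F(n), F(n+1))
--         if n == 0:
--             return (0, 1)
--         a, b = fib_pair(n >> 1)
--         c = a * (2 * b - a)
--         d = a * a + b * b
--         if n & 1:
--             return (d, c + d)
--         return (c, d)
--     a, b = fib_pair(num)
--     return (b - a, a)  # (F(n-1), F(n)), which also matches the DP seed row at the base
-- ===== Notes on version B (the rewrite author's own statement) =====
-- stated objective: faster
-- what changed: Replaces the O(n) DP table of (zero-count, one-count) pairs with recursive fast-doubling Fibonacci, returning (F(n-1), F(n)) computed in O(log n) arithmetic steps.
import Mathlib
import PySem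

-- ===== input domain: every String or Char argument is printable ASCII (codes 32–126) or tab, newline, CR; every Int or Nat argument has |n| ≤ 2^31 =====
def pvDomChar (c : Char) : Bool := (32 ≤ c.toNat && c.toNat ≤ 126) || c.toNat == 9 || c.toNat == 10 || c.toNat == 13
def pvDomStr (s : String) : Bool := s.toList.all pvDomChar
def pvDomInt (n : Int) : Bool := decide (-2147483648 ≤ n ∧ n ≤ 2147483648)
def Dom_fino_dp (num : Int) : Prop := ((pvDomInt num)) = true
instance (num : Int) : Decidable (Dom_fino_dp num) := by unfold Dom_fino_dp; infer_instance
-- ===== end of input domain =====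

-- B replaces A's O(n) DP table with fast-doubling Fibonacci (O(log n) arithmetic steps); proved equal on num ≥ 0 (A raises IndexError for num < 0).


-- ===== PORT A =====
-- one loop step: cnt[idx] = componentwise sum of cnt[idx-1] and cnt[idx-2]
def finoStep (cnt : List (Int × Int)) (idx : Int) : List (Int × Int) :=
  let p := cnt.getD (idx - 1).toNat ((0 : Int), (0 : Int))
  let q := cnt.getD (idx - 2).toNat ((0 : Int), (0 : Int))
  cnt.set idx.toNat (p.1 + q.1, p.2 + q.2)

-- literal port of A; the table entries start as placeholder (0,0) (Python's int 0,
-- never read or returned on the admitted inputs); Python's tuple result is the 2-element list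
def fino_dp (num : Int) : List Int :=
  let _cache := (PySem.List.pyRange 0 (num + 1) 1).map (fun _ => (0 : Int))
  let cnt0 : List (Int × Int) := (PySem.List.pyRange 0 (num + 1) 1).map (fun _ => ((0 : Int), (0 : Int)))
  let cnt1 := cnt0.set 0 (1, 0)
  if num == 0 then
    let r := cnt1.getD num.toNat ((0 : Int), (0 : Int))
    [r.1, r.2]
  else
    let cnt2 := cnt1.set 1 (0, 1)
    let cntF := (PySem.List.pyRange 2 (num + 1) 1).foldl finoStep cnt2
    let r := cntF.getD num.toNat ((0 : Int), (0 : Int))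
    [r.1, r.2]

-- ===== PORT B =====
-- fast-doubling helper of Source B: fibP n = (F(n), F(n+1))
def fibP : Nat → Int × Int
  | 0 => (0, 1)
  | n + 1 =>
    let m := (n + 1) / 2
    let ab := fibP m
    let a := ab.1
    let b := ab.2
    let c := a * (2 * b - a)
    let d := a * a + b * b
    if (n + 1) % 2 == 1 then (d, c + d) else (c, d)
decreasing_by exact Nat.div_lt_self (Nat.succ_pos n) (by omega)

-- port of Source B; num < 0 (where the Python recursion does not terminate) lies outside Pre_;
-- toNat is only a typing device there, nothing is claimed about it
def fino_dp_alt (num : Int) : List Int :=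
  let ab := fibP num.toNat
  [ab.2 - ab.1, ab.1]

-- ===== PRECONDITION & SPEC =====
-- A raises IndexError (cache[0] = 0 on an empty list) for num < 0; Pre_ excludes exactly those inputs.
def Pre_fino_dp (num : Int) : Prop := 0 ≤ num
instance (num : Int) : Decidable (Pre_fino_dp num) := by unfold Pre_fino_dp; infer_instance
def pvWitness_fino_dp : Int := (7)

def Spec_fino_dp (num : Int) (out : List Int) : Prop := out = fino_dp_alt num
instance (num : Int) (out : List Int) : Decidable (Spec_fino_dp num out) := by unfold Spec_fino_dp; infer_instance

-- ===== CLAIM (what is proved, stated in full; the proofs are below) =====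
def Claim_equal_fino_dp : Prop := ∀ (num : Int), Dom_fino_dp num → Pre_fino_dp num → Spec_fino_dp num (fino_dp num)

-- ===== LEMMAS AND PROOFS =====

-- the initial table of A after the two seed assignments (proof helper)
def finoInit (n : Nat) : List (Int × Int) :=
  (((PySem.List.pyRange 0 ((n : Int) + 1) 1).map (fun _ => ((0 : Int), (0 : Int)))).set 0 (1, 0)).set 1 (0, 1)

-- the table entry A maintains at index i: the seed pair, then (F(i-1), F(i))
def finoE : Nat → Int × Int
  | 0 => (1, 0)
  | i + 1 => ((Nat.fib i : Int), (Nat.fib (i + 1) : Int))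

lemma finoE_add (i : Nat) : finoE (i + 2) = ((finoE (i + 1)).1 + (finoE i).1, (finoE (i + 1)).2 + (finoE i).2) := by
  cases i with
  | zero => simp [finoE]
  | succ j => simp [finoE, Nat.fib_add_two]; push_cast; constructor <;> ring

lemma fibP_eq (n : Nat) : fibP n = ((Nat.fib n : Int), (Nat.fib (n + 1) : Int)) := by
  induction n using Nat.strong_induction_on with
  | _ n ih =>
    match n with
    | 0 => simp [fibP]
    | n + 1 =>
      rw [fibP]
      have hm : (n + 1) / 2 < n + 1 := Nat.div_lt_self (Nat.succ_pos n) (by omega)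
      rw [ih _ hm]
      set m := (n + 1) / 2 with hmdef
      have hfm : Nat.fib m ≤ 2 * Nat.fib (m + 1) := by
        have := Nat.fib_le_fib_succ (n := m); omega
      have h2m : (Nat.fib (2 * m) : Int) = (Nat.fib m : Int) * (2 * (Nat.fib (m + 1) : Int) - (Nat.fib m : Int)) := by
        rw [Nat.fib_two_mul]
        push_cast [Nat.sub_add_cancel, hfm]
        ring
      have h2m1 : (Nat.fib (2 * m + 1) : Int) = (Nat.fib m : Int) * (Nat.fib m : Int) + (Nat.fib (m + 1) : Int) * (Nat.fib (m + 1) : Int) := by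
        rw [Nat.fib_two_mul_add_one]
        push_cast
        ring
      by_cases hpar : (n + 1) % 2 = 1
      · have hodd : n + 1 = 2 * m + 1 := by omega
        simp only [hpar, beq_self_eq_true, if_true]
        rw [hodd, h2m1]
        have h2 : 2 * m + 1 + 1 = 2 * (m + 1) := by ring
        rw [h2, Nat.fib_two_mul]
        have hfm1 : Nat.fib (m + 1) ≤ 2 * Nat.fib (m + 1 + 1) := by
          have := Nat.fib_le_fib_succ (n := m + 1); omega
        push_cast [Nat.sub_add_cancel, hfm1]
        rw [Nat.fib_add_two, Prod.mk.injEq]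
        refine ⟨rfl, ?_⟩
        push_cast
        ring
      · have heven : n + 1 = 2 * m := by omega
        have hne : ¬ ((n + 1) % 2 == 1) = true := by simp [hpar]
        simp only [hne, if_false, Bool.false_eq_true]
        rw [heven, h2m, h2m1]

lemma finoInit_length (n : Nat) : (finoInit n).length = n + 1 := by
  simp [finoInit, PySem.List.length_pyRange_one]

lemma finoInit_get0 (n : Nat) (_hn : 1 ≤ n) : (finoInit n)[0]? = some (finoE 0) := by
  unfold finoInit
  rw [List.getElem?_set_ne (by omega)]
  apply List.getElem?_set_eq_of_lt
  simp [PySem.List.length_pyRange_one]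

lemma finoInit_get1 (n : Nat) (hn : 1 ≤ n) : (finoInit n)[1]? = some (finoE 1) := by
  unfold finoInit
  have : (finoE 1) = ((0 : Int), (1 : Int)) := by simp [finoE]
  rw [this]
  apply List.getElem?_set_eq_of_lt
  simp [PySem.List.length_pyRange_one]
  omega

-- loop invariant: after folding range(2, k+1), entries 0..k hold finoE and length is preserved
lemma fold_invariant (n : Nat) (hn : 1 ≤ n) (k : Nat) (h1 : 1 ≤ k) (hk : k ≤ n) :
    ((PySem.List.pyRange 2 ((k : Int) + 1) 1).foldl finoStep (finoInit n)).length = n + 1 ∧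
    ∀ i : Nat, i ≤ k → ((PySem.List.pyRange 2 ((k : Int) + 1) 1).foldl finoStep (finoInit n))[i]? = some (finoE i) := by
  induction k with
  | zero => omega
  | succ k ihk =>
    by_cases hk1 : k = 0
    · subst hk1
      have hr : PySem.List.pyRange 2 (((0 : Nat) : Int) + 1 + 1) 1 = [] :=
        PySem.List.pyRange_one_eq_nil (by norm_num)
      have hc : (((0 : Nat) + 1 : Nat) : Int) + 1 = ((0 : Nat) : Int) + 1 + 1 := by norm_num
      rw [hc, hr]
      simp only [List.foldl_nil]
      refine ⟨finoInit_length n, ?_⟩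
      intro i hi
      interval_cases i
      · exact finoInit_get0 n hn
      · exact finoInit_get1 n hn
    · have h1k : 1 ≤ k := by omega
      have hkn : k ≤ n := by omega
      obtain ⟨hlen, hent⟩ := ihk h1k hkn
      have hcast : ((k + 1 : Nat) : Int) + 1 = ((k : Int) + 1) + 1 := by push_cast; ring
      have hsplit : PySem.List.pyRange 2 (((k : Int) + 1) + 1) 1 = PySem.List.pyRange 2 ((k : Int) + 1) 1 ++ [(k : Int) + 1] :=
        PySem.List.pyRange_one_succ_right (by omega)
      rw [hcast, hsplit, List.foldl_append]
      set S := (PySem.List.pyRange 2 ((k : Int) + 1) 1).foldl finoStep (finoInit n) with hS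
      simp only [List.foldl_cons, List.foldl_nil]
      unfold finoStep
      have hidx1 : ((k : Int) + 1 - 1).toNat = k := by omega
      have hidx2 : ((k : Int) + 1 - 2).toNat = k - 1 := by omega
      have hidx0 : ((k : Int) + 1).toNat = k + 1 := by omega
      simp only [hidx1, hidx2, hidx0]
      have hgd1 : S.getD k ((0 : Int), (0 : Int)) = finoE k := by
        simp [List.getD, hent k (le_refl k)]
      have hgd2 : S.getD (k - 1) ((0 : Int), (0 : Int)) = finoE (k - 1) := by
        simp [List.getD, hent (k - 1) (by omega)]
      rw [hgd1, hgd2]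
      refine ⟨by simp [hlen], ?_⟩
      intro i hi
      by_cases hik : i = k + 1
      · subst hik
        have hE : finoE (k + 1) = ((finoE k).1 + (finoE (k - 1)).1, (finoE k).2 + (finoE (k - 1)).2) := by
          have h := finoE_add (k - 1)
          have e2 : k - 1 + 2 = k + 1 := by omega
          have e1 : k - 1 + 1 = k := by omega
          rw [e2, e1] at h
          exact h
        rw [hE]
        apply List.getElem?_set_eq_of_lt
        simp [hlen]
        omega
      · rw [List.getElem?_set_ne (by omega)]
        exact hent i (by omega)

-- A's value characterised
lemma fino_dp_eq (n : Nat) : fino_dp (n : Int) = [(finoE n).1, (finoE n).2] := by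
  cases n with
  | zero => decide
  | succ n =>
    unfold fino_dp
    have hne : ¬ (((n + 1 : Nat) : Int) == 0) = true := by simp; omega
    rw [if_neg hne]
    obtain ⟨hlen, hent⟩ := fold_invariant (n + 1) (by omega) (n + 1) (by omega) (le_refl _)
    have h := hent (n + 1) (le_refl _)
    rw [finoInit] at h
    have hidx : ((n + 1 : Nat) : Int).toNat = n + 1 := by omega
    simp only [List.getD_eq_getElem?_getD, hidx, h, Option.getD_some]

-- ===== VERDICT (by name: the statement is the Claim_ definition above) =====
theorem fino_dp_spec : Claim_equal_fino_dp := by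
  intro num _hdom hpre
  unfold Spec_fino_dp fino_dp_alt
  unfold Pre_fino_dp at hpre
  have hn : num = ((num.toNat : Nat) : Int) := by omega
  rw [hn, fino_dp_eq, fibP_eq]
  cases h : num.toNat with
  | zero => simp [finoE]
  | succ m =>
    simp only [finoE, Int.toNat_natCast]
    rw [Nat.fib_add_two]
    congr 1
    push_cast
    ring
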